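-- pv_equiv track=rewrite | github.com/H-S-S/Gagnaskipan | Shortest-Distance/Best Pricing Shop/ReadRecite.py | makes_lines_if_close_enogh_2
-- ===== SOURCE A (Python) =====
-- PRESITION_X = 75
--
-- def makes_lines_if_close_enogh_2(array_of_array_points):
--     the_line_array = []
--     #sorts all arrays by x value
--     for array in array_of_array_points:
--         array.sort(key=lambda x: x[0], reverse=False)
--
--     for i in range(len(array_of_array_points)):
--         min_x = array_of_array_points[i][0][0]
--         max_x = array_of_array_points[i][0][0]
--         min_y = array_of_array_points[i][0][1]
--         max_y = array_of_array_points[i][0][1]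
--
--         first_x = array_of_array_points[i][0][0]
--         first_y = array_of_array_points[i][0][1]
--         for ii in range(len(array_of_array_points[i])):
--
--             x_value = array_of_array_points[i][ii][0]
--             y_value = array_of_array_points[i][ii][1]
--
--             if abs(x_value-max_x) <= PRESITION_X:
--                 if x_value > max_x:
--                     max_x = x_value
--                 if x_value < min_x:
--                     min_x = x_value
--                 if y_value > max_y:
--                     max_y = y_value
--                 if y_value < min_y:
--                     min_y = y_value
--             else:
--                 the_line_array.append([(first_x, first_y),(x_value, y_value)])
--                 average_y = int(round((min_y+max_y)/2, 0))
--                 min_x = array_of_array_points[i][ii][0]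
--                 max_x = array_of_array_points[i][ii][0]
--                 min_y = array_of_array_points[i][ii][1]
--                 max_y = array_of_array_points[i][ii][1]
--
--                 first_x = array_of_array_points[i][ii][0]
--                 first_y = array_of_array_points[i][ii][1]
--
--             if (ii+1) == len(array_of_array_points[i]):
--                 the_line_array.append([(first_x, first_y), (x_value, y_value)])
--
--     return the_line_array
-- ===== SOURCE B (Python) =====
-- PRESITION_X = 75
--
-- def makes_lines_if_close_enogh_2(array_of_array_points):
--     # NOTE: sorts each inner array in place, like the original.
--     result = []
--     for arr in array_of_array_points:
--         arr.sort(key=lambda p: p[0])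
--         # split the sorted points into consecutive groups: a new group starts
--         # whenever the x-gap to the previous point exceeds PRESITION_X
--         groups = []
--         current = [arr[0]]
--         for p in arr[1:]:
--             if p[0] - current[-1][0] > PRESITION_X:
--                 groups.append(current)
--                 current = [p]
--             else:
--                 current.append(p)
--         groups.append(current)
--         # one segment from each group's first point to the next group's first point
--         for g, h in zip(groups, groups[1:]):
--             result.append([g[0], h[0]])
--         # and the final segment spans the last group
--         result.append([groups[-1][0], groups[-1][-1]])
--     return result
-- ===== Notes on version B (the rewrite author's own statement) =====
-- stated objective: simpler
-- what changed: Replaces A's single flat loop with dead min/max-y/min-x bookkeeping and an in-loop last-index check by a two-phase pass: split the sorted points into gap->75 groups, then emit one segment per adjacent group pair plus the final segment spanning the last group.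
import Mathlib
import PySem

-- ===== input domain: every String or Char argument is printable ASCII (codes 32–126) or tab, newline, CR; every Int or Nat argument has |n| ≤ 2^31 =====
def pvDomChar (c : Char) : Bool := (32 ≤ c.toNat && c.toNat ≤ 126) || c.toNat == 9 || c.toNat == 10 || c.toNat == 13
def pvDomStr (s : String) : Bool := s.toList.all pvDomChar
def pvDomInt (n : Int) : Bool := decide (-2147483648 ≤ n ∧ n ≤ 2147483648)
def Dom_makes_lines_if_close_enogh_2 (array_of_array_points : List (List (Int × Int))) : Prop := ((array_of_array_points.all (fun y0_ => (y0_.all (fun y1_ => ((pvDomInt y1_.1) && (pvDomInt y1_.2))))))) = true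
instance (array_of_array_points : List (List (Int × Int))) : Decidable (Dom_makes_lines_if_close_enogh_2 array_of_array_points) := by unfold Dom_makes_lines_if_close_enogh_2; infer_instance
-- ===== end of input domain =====

-- B replaces A's flat loop with dead min/max bookkeeping by group-splitting then
-- segment emission (objective: simpler). Both A and B sort each inner list in
-- place in Python; the equivalence proved here is about the RETURN value
-- (the mutation is identical in both: each inner list sorted by x).

-- ===== PORT A =====
def PRESITION_X : Int := 75

-- A's inner `for ii in range(len(...))` loop, step for step; the state is
-- (min_x, max_x, min_y, max_y, first_x, first_y) plus the accumulator.
-- (Python also computes `average_y` in the else-branch and never uses it;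
-- that dead float computation is omitted.)
def pvALoop (n : Nat) (ii : Nat) (ps : List (Int × Int))
    (min_x max_x min_y max_y first_x first_y : Int)
    (the_line_array : List (List (Int × Int))) : List (List (Int × Int)) :=
  match ps with
  | [] => the_line_array
  | (x_value, y_value) :: rest =>
    if |x_value - max_x| ≤ PRESITION_X then
      let max_x' := if x_value > max_x then x_value else max_x
      let min_x' := if x_value < min_x then x_value else min_x
      let max_y' := if y_value > max_y then y_value else max_y
      let min_y' := if y_value < min_y then y_value else min_y
      let acc := if ii + 1 = n then the_line_array ++ [[(first_x, first_y), (x_value, y_value)]] else the_line_array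
      pvALoop n (ii + 1) rest min_x' max_x' min_y' max_y' first_x first_y acc
    else
      let acc := the_line_array ++ [[(first_x, first_y), (x_value, y_value)]]
      let acc := if ii + 1 = n then acc ++ [[(x_value, y_value), (x_value, y_value)]] else acc
      pvALoop n (ii + 1) rest x_value x_value y_value y_value x_value y_value acc

def makes_lines_if_close_enogh_2 (array_of_array_points : List (List (Int × Int))) : List (List (Int × Int)) :=
  -- first loop: sorts every inner array by x (in Python: in place)
  let sorted_arrays := array_of_array_points.map (fun array => PySem.List.sorted array (fun p => p.1))
  -- second loop over i
  sorted_arrays.foldl (fun the_line_array arr =>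
    match arr with
    | [] => the_line_array  -- Python raises IndexError here (array[i][0]); excluded by Pre_
    | (fx, fy) :: _ =>
      pvALoop arr.length 0 arr fx fx fy fy fx fy the_line_array) []

-- ===== PORT B =====
-- Source B's grouping loop: state (groups, current); new group when the x-gap
-- from the previous (= last of current) point exceeds PRESITION_X.
def pvBGroups (groups : List (List (Int × Int))) (current : List (Int × Int))
    (ps : List (Int × Int)) : List (List (Int × Int)) × List (Int × Int) :=
  match ps with
  | [] => (groups, current)
  | p :: rest =>
    if p.1 - current.getLast!.1 > PRESITION_X then
      pvBGroups (groups ++ [current]) [p] rest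
    else
      pvBGroups groups (current ++ [p]) rest

-- Source B's emission: one segment per adjacent pair of groups (first point to
-- first point), then the segment spanning the last group.
def pvBEmit (groups : List (List (Int × Int))) : List (List (Int × Int)) :=
  (groups.zip groups.tail).map (fun gh => [gh.1.head!, gh.2.head!])
    ++ [[groups.getLast!.head!, groups.getLast!.getLast!]]

def makes_lines_if_close_enogh_2_alt (array_of_array_points : List (List (Int × Int))) : List (List (Int × Int)) :=
  array_of_array_points.foldl (fun result arr0 =>
    let arr := PySem.List.sorted arr0 (fun p => p.1)
    match arr with
    | [] => result  -- Python raises IndexError (arr[0]); excluded by Pre_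
    | p0 :: rest =>
      let gc := pvBGroups [] [p0] rest
      result ++ pvBEmit (gc.1 ++ [gc.2])) []

-- ===== PRECONDITION & SPEC =====
-- Pre_ excludes inputs containing an empty inner list: there both A and B
-- raise IndexError (array[0] of an empty list).
def Pre_makes_lines_if_close_enogh_2 (array_of_array_points : List (List (Int × Int))) : Prop :=
  ∀ a ∈ array_of_array_points, a ≠ []
instance (array_of_array_points : List (List (Int × Int))) : Decidable (Pre_makes_lines_if_close_enogh_2 array_of_array_points) := by unfold Pre_makes_lines_if_close_enogh_2; infer_instance

def pvWitness_makes_lines_if_close_enogh_2 : (List (List (Int × Int))) :=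
  [[(100, 5), (0, 0), (40, 7)], [(0, 1), (200, 2)]]

def Spec_makes_lines_if_close_enogh_2 (array_of_array_points : List (List (Int × Int))) (out : List (List (Int × Int))) : Prop := out = makes_lines_if_close_enogh_2_alt array_of_array_points
instance (array_of_array_points : List (List (Int × Int))) (out : List (List (Int × Int))) : Decidable (Spec_makes_lines_if_close_enogh_2 array_of_array_points out) := by unfold Spec_makes_lines_if_close_enogh_2; infer_instance

-- ===== CLAIM (what is proved, stated in full; the proofs are below) =====
def Claim_equal_makes_lines_if_close_enogh_2 : Prop := ∀ (array_of_array_points : List (List (Int × Int))), Dom_makes_lines_if_close_enogh_2 array_of_array_points → Pre_makes_lines_if_close_enogh_2 array_of_array_points → Spec_makes_lines_if_close_enogh_2 array_of_array_points (makes_lines_if_close_enogh_2 array_of_array_points)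

-- ===== LEMMAS AND PROOFS =====

-- Common characterisation: the segments produced for the tail `ps`, given the
-- first point `f` of the current group and the previous point `l`.
def pvV (f l : Int × Int) (ps : List (Int × Int)) : List (List (Int × Int)) :=
  match ps with
  | [] => [[f, l]]
  | p :: rest => if p.1 - l.1 > PRESITION_X then [f, p] :: pvV p p rest else pvV f p rest

-- adjacent-pair segments, on the list of group heads
def pvAdjH : List (Int × Int) → List (List (Int × Int))
  | a :: b :: t => [a, b] :: pvAdjH (b :: t)
  | _ => []

theorem pv_getLast_concat {α : Type} [Inhabited α] : ∀ (l : List α) (a : α), (l ++ [a]).getLast! = a := by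
  intro l a
  simp

theorem pv_head_append {α : Type} [Inhabited α] (c : List α) (hc : c ≠ []) (t : List α) :
    (c ++ t).head! = c.head! := by
  cases c with
  | nil => exact absurd rfl hc
  | cons a c' => rfl

theorem pv_zipmap_eq_adjH : ∀ (l : List (List (Int × Int))),
    (l.zip l.tail).map (fun gh => [gh.1.head!, gh.2.head!]) = pvAdjH (l.map List.head!) := by
  intro l
  induction l with
  | nil => rfl
  | cons a t ih =>
    cases t with
    | nil => rfl
    | cons b t' =>
      simp only [List.map_cons, pvAdjH, List.tail_cons, List.zip_cons_cons, List.map]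
      rw [← List.map_cons, ← ih]
      rfl

theorem pv_adjH_concat : ∀ (xs : List (Int × Int)), xs ≠ [] → ∀ (y : Int × Int),
    pvAdjH (xs ++ [y]) = pvAdjH xs ++ [[xs.getLast!, y]] := by
  intro xs
  induction xs with
  | nil => intro h; exact absurd rfl h
  | cons a t ih =>
    intro _ y
    cases t with
    | nil => rfl
    | cons b t' =>
      simp only [List.cons_append, pvAdjH]
      rw [← List.cons_append, ih (by simp) y]
      have h2 : (a :: b :: t').getLast! = (b :: t').getLast! := by simp
      rw [h2]

-- B-side: the grouping loop followed by emission produces the adjacent-head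
-- segments of the groups so far plus pvV on the remaining points.
theorem pvB_char : ∀ (ps : List (Int × Int)) (gs : List (List (Int × Int))) (c : List (Int × Int)), c ≠ [] →
    pvBEmit ((pvBGroups gs c ps).1 ++ [(pvBGroups gs c ps).2])
      = pvAdjH ((gs ++ [c]).map List.head!) ++ pvV c.head! c.getLast! ps := by
  intro ps
  induction ps with
  | nil =>
    intro gs c hc
    simp only [pvBGroups, pvBEmit, pvV]
    rw [pv_zipmap_eq_adjH, pv_getLast_concat]
  | cons p rest ih =>
    intro gs c hc
    simp only [pvBGroups, pvV]
    by_cases hbr : p.1 - c.getLast!.1 > PRESITION_X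
    · simp only [if_pos hbr]
      rw [ih (gs ++ [c]) [p] (by simp)]
      have hmap : ((gs ++ [c]) ++ [[p]]).map List.head! = (gs ++ [c]).map List.head! ++ [p] := by
        simp [List.head!]
      rw [hmap, pv_adjH_concat _ (by simp) _]
      have : ((gs ++ [c]).map List.head!).getLast! = c.head! := by
        rw [List.map_append]; simp only [List.map]
        exact pv_getLast_concat _ _
      rw [this]
      simp [List.head!, List.getLast!]
    · simp only [if_neg hbr]
      rw [ih gs (c ++ [p]) (by simp)]
      rw [pv_head_append c hc [p], pv_getLast_concat]
      have hmap : (gs ++ [c ++ [p]]).map List.head! = (gs ++ [c]).map List.head! := by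
        simp only [List.map_append, List.map]
        rw [pv_head_append c hc [p]]
      rw [hmap]

-- A-side: under sortedness, A's flat loop equals pvV appended to the accumulator.
theorem pvA_char : ∀ (ps : List (Int × Int)) (n ii : Nat) (mnx mx mny my : Int)
    (f l : Int × Int) (acc : List (List (Int × Int))),
    ps ≠ [] → ii + ps.length = n → mx = l.1 →
    (∀ p ∈ ps, mx ≤ p.1) → List.Pairwise (fun a b => a.1 ≤ b.1) ps →
    pvALoop n ii ps mnx mx mny my f.1 f.2 acc = acc ++ pvV f l ps := by
  intro ps
  induction ps with
  | nil => intro _ _ _ _ _ _ _ _ _ h; exact absurd rfl h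
  | cons q rest ih =>
    intro n ii mnx mx mny my f l acc _ hn hml hle hpw
    obtain ⟨x, y⟩ := q
    have hmx : mx ≤ x := hle (x, y) (by simp)
    have habs : |x - mx| ≤ PRESITION_X ↔ ¬ (x - l.1 > PRESITION_X) := by
      rw [abs_of_nonneg (by omega)]; omega
    rw [List.pairwise_cons] at hpw
    simp only [pvALoop, pvV]
    by_cases hbr : x - l.1 > PRESITION_X
    · rw [if_neg (by rw [habs]; exact fun h => h hbr), if_pos hbr]
      cases rest with
      | nil =>
        have : ii + 1 = n := by simpa using hn
        rw [if_pos this]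
        simp [pvALoop, pvV]
      | cons r rest' =>
        have : ¬ (ii + 1 = n) := by simp at hn; omega
        rw [if_neg this]
        rw [ih n (ii + 1) x x y y (x, y) (x, y) _ (by simp) (by simp at hn ⊢; omega) rfl
          (fun p hp => hpw.1 p hp) hpw.2]
        simp
    · rw [if_pos (habs.mpr hbr), if_neg hbr]
      have hmx' : (if x > mx then x else mx) = x := by split <;> omega
      rw [hmx']
      cases rest with
      | nil =>
        have : ii + 1 = n := by simpa using hn
        rw [if_pos this]
        simp [pvALoop, pvV]
      | cons r rest' =>
        have : ¬ (ii + 1 = n) := by simp at hn; omega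
        rw [if_neg this]
        exact ih n (ii + 1) _ x _ _ f (x, y) acc (by simp) (by simp at hn ⊢; omega) rfl
          (fun p hp => hpw.1 p hp) hpw.2

-- per inner array: A's contribution from accumulator acc equals B's
theorem pv_per_array (arr0 : List (Int × Int)) (h : arr0 ≠ []) (acc : List (List (Int × Int))) :
    (match PySem.List.sorted arr0 (fun p => p.1) with
      | [] => acc
      | (fx, fy) :: _ =>
        pvALoop (PySem.List.sorted arr0 (fun p => p.1)).length 0
          (PySem.List.sorted arr0 (fun p => p.1)) fx fx fy fy fx fy acc)
      = (match PySem.List.sorted arr0 (fun p => p.1) with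
      | [] => acc
      | p0 :: rest =>
        let gc := pvBGroups [] [p0] rest
        acc ++ pvBEmit (gc.1 ++ [gc.2])) := by
  have hne : PySem.List.sorted arr0 (fun p => p.1) ≠ [] := by
    rw [Ne, PySem.List.sorted_eq_nil_iff]; exact h
  obtain ⟨p0, rest, heq⟩ := List.exists_cons_of_ne_nil hne
  have hpw : List.Pairwise (fun a b : Int × Int => a.1 ≤ b.1) (p0 :: rest) := by
    rw [← heq]; exact PySem.List.sorted_pairwise arr0 (fun p => p.1)
  have hhead : ∀ p ∈ p0 :: rest, p0.1 ≤ p.1 := by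
    intro p hp
    rcases List.mem_cons.mp hp with h1 | h2
    · rw [h1]
    · exact (List.pairwise_cons.mp hpw).1 p h2
  rw [heq]
  simp only
  have hA : pvALoop (p0 :: rest).length 0 (p0 :: rest) p0.1 p0.1 p0.2 p0.2 p0.1 p0.2 acc
      = acc ++ pvV p0 p0 (p0 :: rest) :=
    pvA_char (p0 :: rest) (p0 :: rest).length 0 p0.1 p0.1 p0.2 p0.2 p0 p0 acc
      (by simp) (by simp) rfl hhead hpw
  have hV : pvV p0 p0 (p0 :: rest) = pvV p0 p0 rest := by
    simp only [pvV]; rw [if_neg (show ¬(p0.1 - p0.1 > PRESITION_X) by unfold PRESITION_X; omega)]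
  have hB : pvBEmit ((pvBGroups [] [p0] rest).1 ++ [(pvBGroups [] [p0] rest).2])
      = pvV p0 p0 rest := by
    rw [pvB_char rest [] [p0] (by simp)]
    rfl
  rw [hA, hV, ← hB]

-- ===== VERDICT (by name: the statement is the Claim_ definition above) =====
theorem makes_lines_if_close_enogh_2_spec : Claim_equal_makes_lines_if_close_enogh_2 := by
  intro aaps _ hpre
  unfold Spec_makes_lines_if_close_enogh_2 makes_lines_if_close_enogh_2 makes_lines_if_close_enogh_2_alt
  simp only [List.foldl_map]
  apply PySem.List.foldl_congr_mem
  intro acc a ha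
  exact pv_per_array a (hpre a ha) acc
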